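-- pv_equiv track=rewrite | github.com/Reaper-ai/AdventOfCode2023 | day9/Oasis.py | nth_term
-- ===== SOURCE A (Python) =====
-- def nth_term(sequence, n):
--     # Generate difference sequences
--     diff_sequences = [sequence]
--     while len(diff_sequences[-1]) > 1:
--         next_diff = [j - i for i, j in zip(diff_sequences[-1], diff_sequences[-1][1:])]
--         diff_sequences.append(next_diff)
--
--     # Calculate the nth term using the method of differences
--     nth_term = 0
--     for i, diff in enumerate(diff_sequences):
--         if i >= n:
--             break
--         nth_term += diff[0] * combination(n - 1, i)
--
--     return nth_term
--
-- def combination(n, r):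
--     from math import factorial
--     return factorial(n) // (factorial(r) * factorial(n - r))
-- ===== SOURCE B (Python) =====
-- def nth_term(sequence, n):
--     # One fused pass: keep only the current difference row and update the
--     # binomial coefficient C(n-1, i) incrementally (no factorials, stops
--     # as soon as the row is exhausted or i reaches n).
--     total = 0
--     coeff = 1  # C(n-1, i)
--     cur = list(sequence)
--     i = 0
--     while cur and i < n:
--         total += cur[0] * coeff
--         coeff = coeff * (n - 1 - i) // (i + 1)
--         cur = [b - a for a, b in zip(cur, cur[1:])]
--         i += 1
--     return total
-- ===== Notes on version B (the rewrite author's own statement) =====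
-- stated objective: faster
-- what changed: One fused loop keeps only the current difference row and updates the binomial coefficient C(n-1,i) incrementally by multiply/exact-divide, instead of first storing every difference row and then recomputing three factorials (including factorial(n-1)) for each term.
import Mathlib
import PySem

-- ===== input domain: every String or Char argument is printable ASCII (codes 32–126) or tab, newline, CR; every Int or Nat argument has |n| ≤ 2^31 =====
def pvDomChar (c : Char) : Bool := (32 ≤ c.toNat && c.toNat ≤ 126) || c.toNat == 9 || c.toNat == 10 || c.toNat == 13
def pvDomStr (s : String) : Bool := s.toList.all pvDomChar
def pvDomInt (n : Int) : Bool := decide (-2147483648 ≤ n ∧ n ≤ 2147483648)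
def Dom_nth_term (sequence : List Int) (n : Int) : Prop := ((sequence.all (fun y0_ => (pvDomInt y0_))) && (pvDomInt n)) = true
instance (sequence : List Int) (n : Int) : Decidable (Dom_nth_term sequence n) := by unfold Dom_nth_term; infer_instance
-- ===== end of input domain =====

-- B fuses row generation and summation into one loop that keeps only the
-- current difference row and maintains C(n-1,i) incrementally (no factorials).


-- ===== PORT A =====

-- [j - i for i, j in zip(row, row[1:])]
def nextDiffA (xs : List Int) : List Int := (xs.zip xs.tail).map (fun p => p.2 - p.1)

theorem nextDiffA_length (xs : List Int) : (nextDiffA xs).length = xs.length - 1 := by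
  simp [nextDiffA]

-- the while-loop building diff_sequences, starting from [sequence]
def diffSeqs (cur : List Int) : List (List Int) :=
  if cur.length > 1 then cur :: diffSeqs (nextDiffA cur) else [cur]
termination_by cur.length
decreasing_by rw [nextDiffA_length]; omega

-- math.factorial(n) // (factorial(r) * factorial(n - r)); A only calls it with
-- 0 ≤ r ≤ n under Pre_ (toNat is exact there)
def combination (n r : Int) : Int :=
  PySem.Int.floordiv (Nat.factorial n.toNat : Int)
    ((Nat.factorial r.toNat : Int) * (Nat.factorial (n - r).toNat : Int))

-- the for-loop with its break; diff[0] → headI (under Pre_ every row is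
-- nonempty; Python raises IndexError on the empty row, excluded by Pre_)
def sumLoopA : List (List Int) → Int → Int → Int → Int
  | [], _, _, acc => acc
  | d :: rest, i, n, acc =>
      if i ≥ n then acc
      else sumLoopA rest (i + 1) n (acc + d.headI * combination (n - 1) i)

def nth_term (sequence : List Int) (n : Int) : Int :=
  sumLoopA (diffSeqs sequence) 0 n 0

-- ===== PORT B =====

-- [b - a for a, b in zip(cur, cur[1:])]
def nextDiffB (xs : List Int) : List Int := (xs.zip xs.tail).map (fun p => p.2 - p.1)

theorem nextDiffB_length (xs : List Int) : (nextDiffB xs).length = xs.length - 1 := by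
  simp [nextDiffB]

-- while cur and i < n: …  (the coeff update is Python's floor division //)
def loopB (cur : List Int) (i n total coeff : Int) : Int :=
  if cur ≠ [] ∧ i < n then
    loopB (nextDiffB cur) (i + 1) n (total + cur.headI * coeff)
      (PySem.Int.floordiv (coeff * (n - 1 - i)) (i + 1))
  else total
termination_by cur.length
decreasing_by rename_i h; rw [nextDiffB_length]; cases cur with
  | nil => exact absurd rfl h.1
  | cons a t => simp

def nth_term_alt (sequence : List Int) (n : Int) : Int :=
  loopB sequence 0 n 0 1

-- ===== PRECONDITION & SPEC =====
-- Pre_ excludes exactly the inputs where A raises IndexError: the empty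
-- sequence with n ≥ 1 (diff[0] of the empty row).
def Pre_nth_term (sequence : List Int) (n : Int) : Prop := sequence ≠ [] ∨ n ≤ 0
instance (sequence : List Int) (n : Int) : Decidable (Pre_nth_term sequence n) := by
  unfold Pre_nth_term; infer_instance

def pvWitness_nth_term : List Int × Int := ([1, 3, 6, 10], 6)

def Spec_nth_term (sequence : List Int) (n : Int) (out : Int) : Prop := out = nth_term_alt sequence n
instance (sequence : List Int) (n : Int) (out : Int) : Decidable (Spec_nth_term sequence n out) := by unfold Spec_nth_term; infer_instance

-- ===== CLAIM =====
def Claim_equal_nth_term : Prop := ∀ (sequence : List Int) (n : Int), Dom_nth_term sequence n → Pre_nth_term sequence n → Spec_nth_term sequence n (nth_term sequence n)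

-- ===== LEMMAS AND PROOFS =====

theorem comb_eq_choose (n r : Int) (hr : 0 ≤ r) (hrn : r ≤ n) :
    combination n r = (n.toNat.choose r.toNat : Int) := by
  have h1 : (n - r).toNat = n.toNat - r.toNat := by omega
  rw [combination, h1,
    show ((Nat.factorial r.toNat : Int) * (Nat.factorial (n.toNat - r.toNat) : Int))
        = ((Nat.factorial r.toNat * Nat.factorial (n.toNat - r.toNat) : Nat) : Int) by push_cast; ring,
    PySem.Int.floordiv_natCast,
    Nat.choose_eq_factorial_div_factorial (by omega : r.toNat ≤ n.toNat)]

-- Python's c = c * (n-1-i) // (i+1) turns C(n-1,i) into C(n-1,i+1) exactly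
theorem comb_step (n i : Int) (h0 : 0 ≤ i) (hn : i + 1 < n) :
    PySem.Int.floordiv (combination (n - 1) i * (n - 1 - i)) (i + 1)
      = combination (n - 1) (i + 1) := by
  rw [comb_eq_choose (n-1) i h0 (by omega), comb_eq_choose (n-1) (i+1) (by omega) (by omega)]
  have hk : (i + 1).toNat = i.toNat + 1 := by omega
  have hd : (n - 1 - i) = (((n-1).toNat - i.toNat : Nat) : Int) := by omega
  rw [hd, hk,
    show ((((n-1).toNat.choose i.toNat : Nat) : Int) * (((n-1).toNat - i.toNat : Nat) : Int))
        = ((( (n-1).toNat.choose i.toNat * ((n-1).toNat - i.toNat)) : Nat) : Int) by push_cast; ring,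
    show ((i:Int) + 1) = ((i.toNat + 1 : Nat) : Int) by omega,
    PySem.Int.floordiv_natCast,
    ← Nat.choose_succ_right_eq,
    Nat.mul_div_cancel _ (Nat.succ_pos i.toNat)]

theorem comb_zero (n : Int) : combination (n - 1) 0 = 1 := by
  rw [combination]
  simp only [Int.toNat_zero, Nat.factorial_zero, Int.sub_zero, Nat.cast_one, one_mul]
  rw [PySem.Int.floordiv_natCast]
  simp [Nat.div_self (Nat.factorial_pos _)]

theorem nextDiffB_eq (xs : List Int) : nextDiffB xs = nextDiffA xs := rfl

-- invariant: B's coeff equals A's combination(n-1, i) whenever another term is taken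
theorem main_loop (L : Nat) : ∀ (cur : List Int), cur.length ≤ L →
    ∀ (i n acc c : Int), 0 ≤ i → (i < n → c = combination (n - 1) i) →
    sumLoopA (diffSeqs cur) i n acc = loopB cur i n acc c := by
  induction L with
  | zero =>
    intro cur hlen i n acc c h0 hc
    have hnil : cur = [] := List.length_eq_zero_iff.mp (by omega)
    subst hnil
    rw [diffSeqs, loopB]
    simp only [List.length_nil]
    split_ifs with h1 h2 <;> simp_all [sumLoopA]
  | succ L ih =>
    intro cur hlen i n acc c h0 hc
    rw [diffSeqs, loopB]
    by_cases hbig : cur.length > 1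
    · have hne : cur ≠ [] := by intro h; subst h; simp at hbig
      by_cases hin : i < n
      · rw [if_pos hbig, if_pos ⟨hne, hin⟩]
        simp only [sumLoopA, if_neg (not_le.mpr hin)]
        rw [hc hin, nextDiffB_eq]
        apply ih
        · rw [nextDiffA_length]; omega
        · omega
        · intro hin1
          exact comb_step n i h0 hin1
      · rw [if_pos hbig]
        simp only [sumLoopA, if_pos (not_lt.mp hin)]
        rw [if_neg (by tauto)]
    · rw [if_neg hbig]
      by_cases hin : i < n
      · simp only [sumLoopA, if_neg (not_le.mpr hin)]
        cases cur with
        | nil =>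
          rw [if_neg (by simp)]
          simp
        | cons a t =>
          have ht : t = [] := by simp at hbig; omega
          subst ht
          rw [if_pos ⟨by simp, hin⟩, loopB]
          rw [if_neg (by simp [nextDiffB])]
          simp [hc hin]
      · simp only [sumLoopA, if_pos (not_lt.mp hin)]
        rw [if_neg (by tauto)]

-- ===== VERDICT =====
theorem nth_term_spec : Claim_equal_nth_term := by
  intro sequence n _ _
  unfold Spec_nth_term nth_term nth_term_alt
  exact main_loop sequence.length sequence le_rfl 0 n 0 1 le_rfl (fun _ => (comb_zero n).symm)
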